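-- pv_equiv track=rewrite | github.com/hi-rachel/Algorithms | 백준/Gold/2225. 합분해/합분해.py | solve
-- ===== SOURCE A (Python) =====
-- MOD = 1000000000
--
-- def solve(N, K):
--     dp = [[0] * (N + 1) for _ in range(K + 1)]
--
--     for k in range(1, K + 1):
--         dp[k][0] = 1
--
--     for k in range(1, K + 1):
--         for n in range(1, N + 1):
--             dp[k][n] = (dp[k-1][n] + dp[k][n-1]) % MOD
--
--     return dp[K][N]
-- ===== SOURCE B (Python) =====
-- MOD = 1000000000
--
-- def solve(N, K):
--     # C(N+K-1, N) computed as an exact integer product, reduced mod 1e9 at the end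
--     res = 1
--     for r in range(1, N + 1):
--         res = res * (K - 1 + r) // r
--     return res % MOD
-- ===== Notes on version B (the rewrite author's own statement) =====
-- stated objective: faster
-- what changed: Replaces the O(N*K) two-dimensional DP table with the closed form C(N+K-1,N), computed by an O(N)-step exact iterative integer product and reduced mod 1e9 at the end.
-- intended difference: On the single input N=0, K=0 A returns 0 but B returns 1, which is the intended count: there is exactly one way (the empty sum) to write 0 as an ordered sum of 0 nonnegative integers. — e.g. on solve(0, 0): A returns 0, B returns 1
import Mathlib
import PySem

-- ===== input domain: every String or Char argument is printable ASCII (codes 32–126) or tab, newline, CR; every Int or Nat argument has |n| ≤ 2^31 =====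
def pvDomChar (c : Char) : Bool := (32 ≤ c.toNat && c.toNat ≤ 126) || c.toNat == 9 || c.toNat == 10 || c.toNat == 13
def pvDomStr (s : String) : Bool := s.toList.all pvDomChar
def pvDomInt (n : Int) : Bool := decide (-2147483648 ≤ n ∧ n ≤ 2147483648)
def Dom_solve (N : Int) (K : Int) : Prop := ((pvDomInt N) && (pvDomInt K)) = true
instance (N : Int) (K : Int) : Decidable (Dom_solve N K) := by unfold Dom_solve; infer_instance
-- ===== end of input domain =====

-- B replaces the O(N*K) DP table with the closed form C(N+K-1,N), computed by an
-- O(N)-step exact integer product and reduced mod 1e9 at the end.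

def MOD : Int := 1000000000

-- ===== PORT A =====
-- Python lists are represented by Arrays (O(1) indexing, like Python);
-- dp[k][n] = v is Array.modify k (setIfInBounds n v), with the RHS computed first.
def solve (N : Int) (K : Int) : Int :=
  (((PySem.List.pyRange 1 (K + 1) 1).foldl
      (fun dp k =>
        (PySem.List.pyRange 1 (N + 1) 1).foldl
          (fun dp n =>
            let v := PySem.Int.mod
              ((dp.getD (k - 1).toNat #[]).getD n.toNat 0
                + (dp.getD k.toNat #[]).getD (n - 1).toNat 0)
              MOD
            dp.modify k.toNat (fun row => row.setIfInBounds n.toNat v))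
          dp)
      ((PySem.List.pyRange 1 (K + 1) 1).foldl
        (fun dp k => dp.modify k.toNat (fun row => row.setIfInBounds 0 1))
        (((PySem.List.pyRange 0 (K + 1) 1).map
            (fun _ => Array.replicate (N + 1).toNat (0 : Int))).toArray))).getD K.toNat #[]).getD
    N.toNat 0

-- ===== PORT B =====
def solve_alt (N : Int) (K : Int) : Int :=
  PySem.Int.mod
    ((PySem.List.pyRange 1 (N + 1) 1).foldl
      (fun res r => PySem.Int.floordiv (res * (K - 1 + r)) r) 1)
    MOD

-- ===== PRECONDITION & SPEC =====
-- Pre_ excludes exactly the inputs where A raises IndexError: N < 0 (rows are empty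
-- lists, dp[k][0] = 1 fails) or K < 0 (dp is empty, dp[K] fails).
def Pre_solve (N : Int) (K : Int) : Prop := 0 ≤ N ∧ 0 ≤ K
instance (N : Int) (K : Int) : Decidable (Pre_solve N K) := by unfold Pre_solve; infer_instance
def pvWitness_solve : Int × Int := (4, 3)

-- On the single input N=0, K=0 A returns 0 but B returns 1, which is the intended
-- count: there is exactly one way (the empty sum) to write 0 as an ordered sum of 0
-- nonnegative integers.
def D_solve (N : Int) (K : Int) : Prop := N = 0 ∧ K = 0
instance (N : Int) (K : Int) : Decidable (D_solve N K) := by unfold D_solve; infer_instance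

def Spec_solve (N : Int) (K : Int) (out : Int) : Prop := ¬ D_solve N K → out = solve_alt N K
instance (N : Int) (K : Int) (out : Int) : Decidable (Spec_solve N K out) := by unfold Spec_solve; infer_instance

def pvDiffWitness_solve : Int × Int := (0, 0)
def pvDiffWitnessOut_solve : Int × Int := (0, 1)

-- ===== CLAIM (what is proved, stated in full; the proofs are below) =====
def Claim_unchanged_solve : Prop := ∀ (N : Int) (K : Int), Dom_solve N K → Pre_solve N K → Spec_solve N K (solve N K)
def Claim_changed_solve : Prop := Dom_solve (pvDiffWitness_solve.1) (pvDiffWitness_solve.2) ∧ Pre_solve (pvDiffWitness_solve.1) (pvDiffWitness_solve.2) ∧ D_solve (pvDiffWitness_solve.1) (pvDiffWitness_solve.2) ∧ solve (pvDiffWitness_solve.1) (pvDiffWitness_solve.2) = pvDiffWitnessOut_solve.1 ∧ solve_alt (pvDiffWitness_solve.1) (pvDiffWitness_solve.2) = pvDiffWitnessOut_solve.2 ∧ pvDiffWitnessOut_solve.1 ≠ pvDiffWitnessOut_solve.2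
def Claim_exact_solve : Prop := ∀ (N : Int) (K : Int), Dom_solve N K → Pre_solve N K → D_solve N K → solve N K ≠ solve_alt N K

-- ===== LEMMAS AND PROOFS =====

theorem MOD_pos : (0 : Int) < MOD := by unfold MOD; norm_num

-- mathematical model of A's table entries: fDP k n = dp[k][n]
def fDP : Nat → Nat → Int
  | 0, _ => 0
  | _ + 1, 0 => 1
  | k + 1, n + 1 => (fDP k (n + 1) + fDP (k + 1) n) % MOD

theorem fDP_zero (n : Nat) : fDP 0 n = 0 := by simp [fDP]

theorem fDP_succ_zero (k : Nat) : fDP (k + 1) 0 = 1 := by simp [fDP]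

theorem fDP_succ_succ (k n : Nat) :
    fDP (k + 1) (n + 1) = (fDP k (n + 1) + fDP (k + 1) n) % MOD := by simp [fDP]

-- entry of the table midway through the fill: rows < k are final, row k is filled
-- up to column m, later rows only have their column 0 set
def ent (k m j n : Nat) : Int :=
  if j < k ∨ n = 0 ∨ (j = k ∧ n ≤ m) then fDP j n else 0

def amap {α : Type} (len : Nat) (F : Nat → α) : Array α := ((List.range len).map F).toArray

def tbl (Nn Kk k m : Nat) : Array (Array Int) :=
  amap (Kk + 1) (fun j => amap (Nn + 1) (fun n => ent k m j n))

theorem amap_congr {α : Type} (len : Nat) (F G : Nat → α)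
    (h : ∀ j, j < len → F j = G j) : amap len F = amap len G := by
  unfold amap
  congr 1
  apply List.map_congr_left
  intro j hj
  exact h j (List.mem_range.mp hj)

theorem amap_getD {α : Type} (len : Nat) (F : Nat → α) (i : Nat) (d : α) (h : i < len) :
    (amap len F).getD i d = F i := by
  unfold amap
  rw [Array.getD_eq_getD_getElem?]
  simp [h]

theorem amap_setIfInBounds {α : Type} (len c : Nat) (v : α) (F : Nat → α) (_h : c < len) :
    (amap len F).setIfInBounds c v = amap len (fun j => if j = c then v else F j) := by
  unfold amap
  apply Array.toList_inj.mp
  simp only [List.setIfInBounds_toArray, List.toList_toArray]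
  apply List.ext_getElem
  · simp
  · intro i h1 h2
    simp only [List.getElem_set, List.getElem_map, List.getElem_range]
    split_ifs <;> first | rfl | omega

theorem amap_modify {α : Type} (len c : Nat) (f : α → α) (F : Nat → α) (_h : c < len) :
    (amap len F).modify c f = amap len (fun j => if j = c then f (F c) else F j) := by
  unfold amap
  apply Array.toList_inj.mp
  simp only [Array.toList_modify]
  apply List.ext_getElem
  · simp
  · intro i h1 h2
    simp only [List.getElem_modify, List.getElem_map, List.getElem_range]
    split_ifs with hic <;> first | rfl | omega | (subst hic; rfl)

theorem ent_shift (Nn Kk kN : Nat) : tbl Nn Kk kN Nn = tbl Nn Kk (kN + 1) 0 := by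
  unfold tbl
  apply amap_congr
  intro j _
  apply amap_congr
  intro n hn
  unfold ent
  split_ifs with h1 h2 h2
  · rfl
  · omega
  · omega
  · rfl

-- one inner-loop iteration: fill dp[k][m+1]
theorem inner_step (Nn Kk kN m : Nat) (h1 : 1 ≤ kN) (h2 : kN ≤ Kk) (hm : m + 1 ≤ Nn) :
    (tbl Nn Kk kN m).modify (((kN : Nat) : Int)).toNat
      (fun row => row.setIfInBounds (((m : Int) + 1)).toNat
        (PySem.Int.mod
          (((tbl Nn Kk kN m).getD ((((kN : Nat) : Int)) - 1).toNat #[]).getD (((m : Int) + 1)).toNat 0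
            + ((tbl Nn Kk kN m).getD (((kN : Nat) : Int)).toNat #[]).getD (((m : Int) + 1) - 1).toNat 0)
          MOD))
      = tbl Nn Kk kN (m + 1) := by
  obtain ⟨j, rfl⟩ : ∃ j, kN = j + 1 := ⟨kN - 1, by omega⟩
  have hc1 : ((((j + 1 : Nat) : Int)) - 1).toNat = j := by omega
  have hc2 : (((m : Int) + 1)).toNat = m + 1 := by omega
  have hc3 : (((m : Int) + 1) - 1).toNat = m := by omega
  have hc4 : (((j + 1 : Nat) : Int)).toNat = j + 1 := by omega
  rw [hc1, hc2, hc3, hc4]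
  unfold tbl
  rw [amap_getD _ _ _ _ (by omega : j + 1 < Kk + 1)]
  rw [amap_getD _ _ _ _ (by omega : j < Kk + 1)]
  rw [amap_getD _ _ _ _ (by omega : m + 1 < Nn + 1)]
  rw [amap_getD _ _ _ _ (by omega : m < Nn + 1)]
  have e1 : ent (j + 1) m j (m + 1) = fDP j (m + 1) := by
    unfold ent; rw [if_pos (Or.inl (by omega))]
  have e2 : ent (j + 1) m (j + 1) m = fDP (j + 1) m := by
    unfold ent
    rcases Nat.eq_zero_or_pos m with hm0 | hm0
    · rw [if_pos (Or.inr (Or.inl hm0))]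
    · rw [if_pos (Or.inr (Or.inr ⟨rfl, le_refl m⟩))]
  rw [e1, e2]
  have hval : PySem.Int.mod (fDP j (m + 1) + fDP (j + 1) m) MOD = fDP (j + 1) (m + 1) := by
    rw [PySem.Int.mod_eq_emod_of_pos MOD_pos, fDP_succ_succ]
  rw [hval]
  rw [amap_modify _ _ _ _ (by omega : j + 1 < Kk + 1)]
  rw [amap_setIfInBounds _ _ _ _ (by omega : m + 1 < Nn + 1)]
  apply amap_congr
  intro i _
  by_cases hij : i = j + 1
  · subst hij
    rw [if_pos rfl]
    apply amap_congr
    intro n _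
    unfold ent
    split_ifs with ha hb hb <;> (try subst ha) <;> first | rfl | omega
  · rw [if_neg hij]
    apply amap_congr
    intro n _
    unfold ent
    split_ifs with ha hb hb <;> (try subst ha) <;> first | rfl | omega

-- the inner loop fills row kN up to column m
theorem inner_loop (Nn Kk : Nat) (k : Int) (kN : Nat) (hk : k = (kN : Int))
    (h1 : 1 ≤ kN) (h2 : kN ≤ Kk) :
    ∀ m : Nat, m ≤ Nn →
      (PySem.List.pyRange 1 ((m : Int) + 1) 1).foldl
        (fun dp n =>
          let v := PySem.Int.mod
            ((dp.getD (k - 1).toNat #[]).getD n.toNat 0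
              + (dp.getD k.toNat #[]).getD (n - 1).toNat 0)
            MOD
          dp.modify k.toNat (fun row => row.setIfInBounds n.toNat v))
        (tbl Nn Kk kN 0)
      = tbl Nn Kk kN m := by
  subst hk
  intro m
  induction m with
  | zero =>
    intro _
    rw [show ((0 : Nat) : Int) + 1 = 1 by norm_num]
    rw [PySem.List.pyRange_one_eq_nil (by omega)]
    rfl
  | succ m ih =>
    intro hm
    have hsplit : PySem.List.pyRange 1 ((((m + 1 : Nat)) : Int) + 1) 1
        = PySem.List.pyRange 1 ((m : Int) + 1) 1 ++ [(m : Int) + 1] := by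
      rw [show (((m + 1 : Nat)) : Int) + 1 = ((m : Int) + 1) + 1 by push_cast; ring]
      exact PySem.List.pyRange_one_succ_right (by omega)
    rw [hsplit, List.foldl_append, ih (by omega)]
    simp only [List.foldl_cons, List.foldl_nil]
    exact inner_step Nn Kk kN m h1 h2 (by omega)

-- the first loop in A: set dp[k][0] = 1 for k = 1..t
def ent1 (t j n : Nat) : Int := if 1 ≤ j ∧ j ≤ t ∧ n = 0 then 1 else 0

theorem loop1 (Nn Kk : Nat) :
    ∀ t : Nat, t ≤ Kk →
      (PySem.List.pyRange 1 ((t : Int) + 1) 1).foldl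
        (fun dp k => dp.modify k.toNat (fun row => row.setIfInBounds 0 1))
        (amap (Kk + 1) (fun _ => amap (Nn + 1) (fun _ => (0 : Int))))
      = amap (Kk + 1) (fun j => amap (Nn + 1) (fun n => ent1 t j n)) := by
  intro t
  induction t with
  | zero =>
    intro _
    rw [show ((0 : Nat) : Int) + 1 = 1 by norm_num]
    rw [PySem.List.pyRange_one_eq_nil (by omega)]
    simp only [List.foldl_nil]
    apply amap_congr
    intro j _
    apply amap_congr
    intro n _
    unfold ent1
    rw [if_neg (by omega)]
  | succ t ih =>
    intro ht
    have hsplit : PySem.List.pyRange 1 ((((t + 1 : Nat)) : Int) + 1) 1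
        = PySem.List.pyRange 1 ((t : Int) + 1) 1 ++ [(t : Int) + 1] := by
      rw [show (((t + 1 : Nat)) : Int) + 1 = ((t : Int) + 1) + 1 by push_cast; ring]
      exact PySem.List.pyRange_one_succ_right (by omega)
    rw [hsplit, List.foldl_append, ih (by omega)]
    simp only [List.foldl_cons, List.foldl_nil]
    rw [show (((t : Int) + 1)).toNat = t + 1 by omega]
    rw [amap_modify _ _ _ _ (by omega : t + 1 < Kk + 1)]
    rw [amap_setIfInBounds _ _ _ _ (by omega : 0 < Nn + 1)]
    apply amap_congr
    intro i _
    by_cases hit : i = t + 1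
    · subst hit
      rw [if_pos rfl]
      apply amap_congr
      intro n _
      unfold ent1
      split_ifs with ha hb hb <;> first | rfl | omega
    · rw [if_neg hit]
      apply amap_congr
      intro n _
      unfold ent1
      split_ifs with ha hb hb <;> first | rfl | omega

theorem loop1_tbl (Nn Kk : Nat) :
    amap (Kk + 1) (fun j => amap (Nn + 1) (fun n => ent1 Kk j n)) = tbl Nn Kk 1 0 := by
  unfold tbl
  apply amap_congr
  intro j hj
  apply amap_congr
  intro n _
  unfold ent1 ent
  rcases j with _ | j
  · rw [if_neg (by omega), if_pos (Or.inl (by omega)), fDP_zero]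
  · rcases n with _ | n
    · rw [if_pos (by omega), if_pos (Or.inr (Or.inl rfl)), fDP_succ_zero]
    · rw [if_neg (by omega), if_neg (by omega)]

-- the outer loop fills rows 1..t
theorem outer_loop (Nn Kk : Nat) :
    ∀ t : Nat, t ≤ Kk →
      (PySem.List.pyRange 1 ((t : Int) + 1) 1).foldl
        (fun dp k =>
          (PySem.List.pyRange 1 ((Nn : Int) + 1) 1).foldl
            (fun dp n =>
              let v := PySem.Int.mod
                ((dp.getD (k - 1).toNat #[]).getD n.toNat 0
                  + (dp.getD k.toNat #[]).getD (n - 1).toNat 0)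
                MOD
              dp.modify k.toNat (fun row => row.setIfInBounds n.toNat v))
            dp)
        (tbl Nn Kk 1 0)
      = tbl Nn Kk (t + 1) 0 := by
  intro t
  induction t with
  | zero =>
    intro _
    rw [show PySem.List.pyRange 1 (((0 : Nat) : Int) + 1) 1 = []
        from PySem.List.pyRange_one_eq_nil (by omega)]
    rfl
  | succ t ih =>
    intro ht
    have hsplit : PySem.List.pyRange 1 ((((t + 1 : Nat)) : Int) + 1) 1
        = PySem.List.pyRange 1 ((t : Int) + 1) 1 ++ [(t : Int) + 1] := by
      rw [show (((t + 1 : Nat)) : Int) + 1 = ((t : Int) + 1) + 1 by push_cast; ring]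
      exact PySem.List.pyRange_one_succ_right (by omega)
    rw [hsplit, List.foldl_append, ih (by omega)]
    simp only [List.foldl_cons, List.foldl_nil]
    rw [inner_loop Nn Kk ((t : Int) + 1) (t + 1) (by push_cast; ring) (by omega) (by omega) Nn (le_refl Nn)]
    exact ent_shift Nn Kk (t + 1)

-- A computes fDP
theorem solve_eq_fDP (Nn Kk : Nat) :
    solve ((Nn : Nat) : Int) ((Kk : Nat) : Int) = fDP Kk Nn := by
  unfold solve
  have hinit : ((PySem.List.pyRange 0 (((Kk : Nat) : Int) + 1) 1).map
        (fun _ => Array.replicate ((((Nn : Nat) : Int) + 1)).toNat (0 : Int))).toArray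
      = amap (Kk + 1) (fun _ => amap (Nn + 1) (fun _ => (0 : Int))) := by
    unfold amap
    congr 1
    rw [List.map_const', List.map_const']
    rw [PySem.List.length_pyRange_one, List.length_range]
    rw [show ((((Kk : Nat) : Int) + 1) - 0).toNat = Kk + 1 by omega]
    congr 1
    apply Array.toList_inj.mp
    simp [List.map_const']
  rw [hinit]
  rw [loop1 Nn Kk Kk (le_refl Kk), loop1_tbl Nn Kk]
  rw [outer_loop Nn Kk Kk (le_refl Kk)]
  unfold tbl
  rw [show (((Kk : Nat) : Int)).toNat = Kk from by omega]
  rw [show (((Nn : Nat) : Int)).toNat = Nn from by omega]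
  rw [amap_getD _ _ _ _ (by omega : Kk < Kk + 1)]
  rw [amap_getD _ _ _ _ (by omega : Nn < Nn + 1)]
  unfold ent
  rw [if_pos (Or.inl (by omega))]

-- fDP is the binomial coefficient mod 1e9
theorem fDP_choose : ∀ (k n : Nat), 1 ≤ k →
    fDP k n = ((Nat.choose (n + (k - 1)) n : Nat) : Int) % MOD := by
  intro k n
  induction k, n using fDP.induct with
  | case1 n => intro h; omega
  | case2 k =>
    intro _
    rw [fDP_succ_zero]
    simp [Nat.choose_zero_right]
    decide
  | case3 k n ih1 ih2 =>
    intro _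
    rw [fDP_succ_succ]
    rcases Nat.eq_zero_or_pos k with hk0 | hk0
    · subst hk0
      rw [fDP_zero, ih2 (by omega)]
      simp [Nat.choose_self]
    · rw [ih1 hk0, ih2 (by omega)]
      rw [Int.add_emod_emod, Int.emod_add_emod]
      congr 1
      have hp : (n + 1 + (k + 1 - 1)).choose (n + 1)
          = (n + 1 + (k - 1)).choose (n + 1) + (n + (k + 1 - 1)).choose n := by
        have h1 : n + 1 + (k + 1 - 1) = (n + (k - 1)) + 1 + 1 := by omega
        have h2 : n + 1 + (k - 1) = (n + (k - 1)) + 1 := by omega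
        have h3 : n + (k + 1 - 1) = (n + (k - 1)) + 1 := by omega
        rw [h1, h2, h3]
        rw [Nat.choose_succ_succ ((n + (k - 1)) + 1) n]
        simp only [Nat.succ_eq_add_one]
        omega
      rw [hp]
      push_cast
      ring

-- B's product loop computes the binomial coefficient exactly (K ≥ 1)
theorem b_loop (kk : Nat) (hkk : 1 ≤ kk) :
    ∀ m : Nat,
      (PySem.List.pyRange 1 ((m : Int) + 1) 1).foldl
        (fun res r => PySem.Int.floordiv (res * (((kk : Nat) : Int) - 1 + r)) r) 1
      = ((Nat.choose (m + (kk - 1)) m : Nat) : Int) := by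
  intro m
  induction m with
  | zero =>
    rw [show ((0 : Nat) : Int) + 1 = 1 by norm_num]
    rw [PySem.List.pyRange_one_eq_nil (by omega)]
    simp
  | succ m ih =>
    have hsplit : PySem.List.pyRange 1 ((((m + 1 : Nat)) : Int) + 1) 1
        = PySem.List.pyRange 1 ((m : Int) + 1) 1 ++ [(m : Int) + 1] := by
      rw [show (((m + 1 : Nat)) : Int) + 1 = ((m : Int) + 1) + 1 by push_cast; ring]
      exact PySem.List.pyRange_one_succ_right (by omega)
    rw [hsplit, List.foldl_append, ih]
    simp only [List.foldl_cons, List.foldl_nil]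
    have hfac : (((kk : Nat) : Int) - 1 + ((m : Int) + 1)) = ((kk + m : Nat) : Int) := by
      push_cast; ring
    rw [hfac]
    have hid : (kk + m) * ((m + (kk - 1)).choose m)
        = ((m + 1 + (kk - 1)).choose (m + 1)) * (m + 1) := by
      have h1 : kk + m = (m + (kk - 1)) + 1 := by omega
      have h2 : m + 1 + (kk - 1) = (m + (kk - 1)) + 1 := by omega
      rw [h1, h2]
      exact Nat.add_one_mul_choose_eq (m + (kk - 1)) m
    have hid' := congrArg (fun x : Nat => (x : Int)) hid
    push_cast at hid'
    have hprod : (((m + (kk - 1)).choose m : Nat) : Int) * ((kk + m : Nat) : Int)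
        = (((m + 1 + (kk - 1)).choose (m + 1) * (m + 1) : Nat) : Int) := by
      push_cast
      linear_combination hid'
    rw [hprod]
    rw [show ((m : Int) + 1) = ((m + 1 : Nat) : Int) by push_cast; ring]
    rw [PySem.Int.floordiv_natCast]
    rw [Nat.mul_div_cancel _ (by omega : 0 < m + 1)]

-- B's loop collapses to 0 once res is 0 (all remaining divisors positive)
theorem b_loop_zero (K : Int) :
    ∀ l : List Int, (∀ r ∈ l, 0 < r) →
      l.foldl (fun res r => PySem.Int.floordiv (res * (K - 1 + r)) r) 0 = 0 := by
  intro l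
  induction l with
  | nil => intro _; rfl
  | cons x xs ih =>
    intro h
    simp only [List.foldl_cons]
    rw [zero_mul, PySem.Int.floordiv_eq_ediv_of_pos (h x (by simp)), Int.zero_ediv]
    exact ih (fun r hr => h r (by simp [hr]))

-- B's loop for K = 0, N ≥ 1: the very first factor is 0
theorem b_loop_k0 (Nn : Nat) (h : 1 ≤ Nn) :
    (PySem.List.pyRange 1 (((Nn : Nat) : Int) + 1) 1).foldl
      (fun res r => PySem.Int.floordiv (res * ((0 : Int) - 1 + r)) r) 1 = 0 := by
  rw [PySem.List.pyRange_one_cons (by omega : (1 : Int) < ((Nn : Nat) : Int) + 1)]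
  simp only [List.foldl_cons]
  rw [show PySem.Int.floordiv (1 * ((0 : Int) - 1 + 1)) 1 = 0 from by decide]
  exact b_loop_zero 0 _ (fun r hr => by
    have := (PySem.List.mem_pyRange_one).mp hr
    omega)

-- ===== VERDICT (by name: the statement is the Claim_ definition above) =====
theorem solve_spec : Claim_unchanged_solve := by
  intro N K _ hPre
  unfold Spec_solve
  intro hnD'
  obtain ⟨hN, hK⟩ := hPre
  obtain ⟨Nn, rfl⟩ : ∃ n : Nat, N = (n : Int) := ⟨N.toNat, (Int.toNat_of_nonneg hN).symm⟩
  obtain ⟨Kk, rfl⟩ : ∃ n : Nat, K = (n : Int) := ⟨K.toNat, (Int.toNat_of_nonneg hK).symm⟩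
  rw [solve_eq_fDP Nn Kk]
  unfold solve_alt
  rcases Nat.eq_zero_or_pos Kk with hKz | hK1
  · -- K = 0: both sides are 0 (N ≥ 1 since (0,0) is excluded by ¬D)
    subst hKz
    have hN1 : 1 ≤ Nn := by
      rcases Nat.eq_zero_or_pos Nn with h0 | h0
      · exfalso
        exact hnD' ⟨by rw [h0]; rfl, rfl⟩
      · omega
    rw [show ((0 : Nat) : Int) = (0 : Int) from rfl]
    rw [b_loop_k0 Nn hN1, fDP_zero]
    decide
  · -- K ≥ 1: both sides are C(N+K-1, N) mod 1e9
    rw [b_loop Kk hK1 Nn]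
    rw [PySem.Int.mod_eq_emod_of_pos MOD_pos]
    rw [fDP_choose Kk Nn hK1]

theorem solve_changed : Claim_changed_solve := by unfold Claim_changed_solve; decide

theorem solve_tight : Claim_exact_solve := by
  intro N K _ _ hD
  obtain ⟨hN, hK⟩ := hD
  subst hN; subst hK
  decide
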